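-- pv_equiv track=rewrite | github.com/hse-wasd-team/werec | task_8/zhurbey/KWIC/main.py | group_n_grams
-- ===== SOURCE A (Python) =====
-- def group_n_grams(n_grams: list[list[str]], n: int) -> dict[str, list[list[str]]]:
--     """Aggregate n_grams into dict where keys are keywords and values are contexts"""
--     aggregate = dict()
--
--     for i in n_grams:
--         keyword = i[n // 2]
--         if keyword in aggregate:
--             aggregate[keyword].append(i)
--             continue
--
--         aggregate[keyword] = [i]
--
--     return aggregate
-- ===== SOURCE B (Python) =====
-- def group_n_grams(n_grams: list[list[str]], n: int) -> dict[str, list[list[str]]]: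
--     """Aggregate n_grams into dict where keys are keywords and values are contexts"""
--     k = n // 2
--     keys = list(dict.fromkeys(row[k] for row in n_grams))
--     return {kw: [row for row in n_grams if row[k] == kw] for kw in keys}
-- ===== Notes on version B (the rewrite author's own statement) =====
-- stated objective: alternative
-- what changed: Replaces the one-pass mutable dict bucketing with a two-pass scheme: an ordered dedup of the keywords followed by one filter comprehension per keyword.
import Mathlib
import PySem

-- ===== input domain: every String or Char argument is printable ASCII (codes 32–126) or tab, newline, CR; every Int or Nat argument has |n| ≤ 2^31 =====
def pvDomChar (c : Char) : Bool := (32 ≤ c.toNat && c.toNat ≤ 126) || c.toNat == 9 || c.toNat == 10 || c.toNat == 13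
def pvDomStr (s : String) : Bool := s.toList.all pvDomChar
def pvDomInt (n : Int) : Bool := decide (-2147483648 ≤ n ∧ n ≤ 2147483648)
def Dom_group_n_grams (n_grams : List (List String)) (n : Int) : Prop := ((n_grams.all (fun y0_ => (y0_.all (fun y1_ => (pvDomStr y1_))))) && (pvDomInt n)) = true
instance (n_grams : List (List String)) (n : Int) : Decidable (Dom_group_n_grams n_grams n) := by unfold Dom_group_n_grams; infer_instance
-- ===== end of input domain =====

-- B replaces A's one-pass mutable-dict bucketing by an ordered dedup of the keywords
-- followed by one filter per keyword (objective: alternative decomposition, not faster).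

-- ===== PORT A =====
def group_n_grams (n_grams : List (List String)) (n : Int) : List (String × List (List String)) :=
  (n_grams.foldl
    (fun (aggregate : PySem.Dict String (List (List String))) i =>
      let keyword := PySem.List.pyGetD i (PySem.Int.floordiv n 2) ""   -- i[n // 2]; total under Pre_
      if aggregate.contains keyword then
        aggregate.insert keyword (aggregate.getD keyword [] ++ [i])    -- aggregate[keyword].append(i)
      else
        aggregate.insert keyword [i])
    PySem.Dict.empty).items

-- ===== PORT B =====
def group_n_grams_alt (n_grams : List (List String)) (n : Int) : List (String × List (List String)) :=
  let k := PySem.Int.floordiv n 2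
  let keys := PySem.List.dedup (n_grams.map (fun row => PySem.List.pyGetD row k ""))
  keys.map (fun kw => (kw, n_grams.filter (fun row => PySem.List.pyGetD row k "" == kw)))

-- ===== PRECONDITION & SPEC =====
-- Pre_ excludes exactly the inputs where Python raises IndexError: some row has no index n // 2.
def Pre_group_n_grams (n_grams : List (List String)) (n : Int) : Prop :=
  ∀ row ∈ n_grams, PySem.Raise.InRange row.length (PySem.Int.floordiv n 2)
instance (n_grams : List (List String)) (n : Int) : Decidable (Pre_group_n_grams n_grams n) := by unfold Pre_group_n_grams; infer_instance
def pvWitness_group_n_grams : List (List String) × Int := ([["a", "b", "c"], ["x", "b", "y"], ["c", "d", "e"]], 3)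

def Spec_group_n_grams (n_grams : List (List String)) (n : Int) (out : List (String × List (List String))) : Prop := out = group_n_grams_alt n_grams n
instance (n_grams : List (List String)) (n : Int) (out : List (String × List (List String))) : Decidable (Spec_group_n_grams n_grams n out) := by unfold Spec_group_n_grams; infer_instance

-- ===== CLAIM (what is proved, stated in full; the proofs are below) =====
def Claim_equal_group_n_grams : Prop := ∀ (n_grams : List (List String)) (n : Int), Dom_group_n_grams n_grams n → Pre_group_n_grams n_grams n → Spec_group_n_grams n_grams n (group_n_grams n_grams n)

-- ===== LEMMAS AND PROOFS =====

-- A's loop body is exactly Dict.modify with default [].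
lemma step_eq_modify (d : PySem.Dict String (List (List String))) (kw : String) (i : List String) :
    (if d.contains kw then d.insert kw (d.getD kw [] ++ [i]) else d.insert kw [i])
      = d.modify kw [] (· ++ [i]) := by
  by_cases h : d.contains kw
  · simp [h, PySem.Dict.modify]
  · simp [h, PySem.Dict.modify, PySem.Dict.getD_of_not_contains d [] (by simpa using h)]

-- The dict A builds, characterised: keys and per-key values of the modify-fold.
lemma group_fold_items (l : List (List String)) (key : List String → String) :
    (l.foldl (fun (d : PySem.Dict String (List (List String))) i => d.modify (key i) [] (· ++ [i]))
        PySem.Dict.empty).items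
      = (PySem.List.dedup (l.map key)).map
          (fun kw => (kw, l.filter (fun row => key row == kw))) := by
  set D := l.foldl (fun (d : PySem.Dict String (List (List String))) i =>
    d.modify (key i) [] (· ++ [i])) PySem.Dict.empty with hD
  have hkeys : D.keys = PySem.List.dedup (l.map key) := by
    rw [hD, PySem.Dict.keys_foldl_modify_key l key [] (fun _ i => (· ++ [i]))]
    simp [PySem.Set.update_nil_left, PySem.List.dedup_eq_ofList]
  have hnd : D.keys.Nodup := by
    rw [hD]
    exact PySem.Dict.nodup_keys_foldl_modify_key l key [] (fun _ i => (· ++ [i]))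
      PySem.Dict.empty (by simp)
  have hget : ∀ c, D.getD c [] = l.filter (fun row => key row == c) := by
    intro c
    have : D = (l.map (fun i => (key i, i))).foldl
        (fun d p => d.modify p.1 [] (· ++ [p.2])) PySem.Dict.empty := by
      rw [hD, List.foldl_map]
    rw [this, PySem.Dict.getD_foldl_modify_append]
    simp [List.filter_map, Function.comp_def]
  rw [PySem.Dict.items_eq_map_keys D hnd [], hkeys]
  exact List.map_congr_left (fun kw _ => by rw [hget kw])

-- ===== VERDICT (by name: the statement is the Claim_ definition above) =====
theorem group_n_grams_spec : Claim_equal_group_n_grams := by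
  intro n_grams n _ _
  show group_n_grams n_grams n = group_n_grams_alt n_grams n
  unfold group_n_grams group_n_grams_alt
  have h := group_fold_items n_grams (fun i => PySem.List.pyGetD i (PySem.Int.floordiv n 2) "")
  rw [← h]
  have hf : (fun (aggregate : PySem.Dict String (List (List String))) (i : List String) =>
        let keyword := PySem.List.pyGetD i (PySem.Int.floordiv n 2) ""
        if aggregate.contains keyword then aggregate.insert keyword (aggregate.getD keyword [] ++ [i])
        else aggregate.insert keyword [i])
      = fun d i => d.modify (PySem.List.pyGetD i (PySem.Int.floordiv n 2) "") [] (· ++ [i]) := by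
    funext d i
    exact step_eq_modify d (PySem.List.pyGetD i (PySem.Int.floordiv n 2) "") i
  rw [hf]
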